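-- pv_equiv track=rewrite | github.com/felipeavs/Depuracao-Automatos-Finitos | utils.py | Verifica_AFD_AFN
-- ===== SOURCE A (Python) =====
-- def Verifica_AFD_AFN(conjuntoTransicoes, conjuntoEstadosIniciais):
--
--     if(len(conjuntoEstadosIniciais) > 1):
--         return 'AFN'
--
--     contador = 0
--     for i in range(len(conjuntoTransicoes)):
--         for j in range(i+1, len(conjuntoTransicoes)):
--             if(conjuntoTransicoes[i][0] == conjuntoTransicoes[j][0] and conjuntoTransicoes[i][1] == conjuntoTransicoes[j][1]):
--                 contador+=1
--
--     if contador > 0: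
--         return 'AFN'
--     else:
--         return 'AFD'
-- ===== SOURCE B (Python) =====
-- def Verifica_AFD_AFN(conjuntoTransicoes, conjuntoEstadosIniciais):
--     if len(conjuntoEstadosIniciais) > 1:
--         return 'AFN'
--     seen = set()
--     for t in conjuntoTransicoes:
--         k = (t[0], t[1])
--         if k in seen:
--             return 'AFN'
--         seen.add(k)
--     return 'AFD'
-- ===== Notes on version B (the rewrite author's own statement) =====
-- stated objective: alternative
-- what changed: Replaced the nested index loops that count all duplicate (state,symbol) pairs with a single pass that records each transition key in a set and returns 'AFN' on the first repeat.
-- outside the precondition, e.g. on Verifica_AFD_AFN([['a'], ['b']], []): A returns 'AFD', B raises IndexError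
import Mathlib
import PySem

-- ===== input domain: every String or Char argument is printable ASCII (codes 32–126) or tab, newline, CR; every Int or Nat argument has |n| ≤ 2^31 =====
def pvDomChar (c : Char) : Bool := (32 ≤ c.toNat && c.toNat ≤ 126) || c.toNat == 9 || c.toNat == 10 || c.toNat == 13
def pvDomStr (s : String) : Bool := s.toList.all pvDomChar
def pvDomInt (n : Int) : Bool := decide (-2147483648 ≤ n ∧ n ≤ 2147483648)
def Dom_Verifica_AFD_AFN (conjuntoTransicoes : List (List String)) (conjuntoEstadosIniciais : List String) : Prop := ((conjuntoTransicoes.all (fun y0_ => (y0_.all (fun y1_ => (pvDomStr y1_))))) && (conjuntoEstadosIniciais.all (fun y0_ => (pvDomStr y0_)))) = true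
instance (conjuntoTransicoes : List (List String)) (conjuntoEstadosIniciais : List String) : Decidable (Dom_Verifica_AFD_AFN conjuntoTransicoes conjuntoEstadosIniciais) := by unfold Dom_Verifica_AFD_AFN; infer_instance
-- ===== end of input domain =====

-- B replaces A's pairwise duplicate count over index pairs with a one-pass scan that records transition keys in a set and stops at the first repeat.

-- ===== PORT A =====
-- A's nested index loops counting pairs i<j with equal (row[0], row[1]); indexing via pyGetD
-- (defaults never reached inside Pre_, where every row has length ≥ 2 or the early guard fires).
def Verifica_AFD_AFN (conjuntoTransicoes : List (List String)) (conjuntoEstadosIniciais : List String) : String :=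
  if conjuntoEstadosIniciais.length > 1 then "AFN"
  else
    let n : Int := conjuntoTransicoes.length
    let contador : Int :=
      (PySem.List.pyRange 0 n 1).foldl (fun c i =>
        (PySem.List.pyRange (i + 1) n 1).foldl (fun c j =>
          if PySem.List.pyGetD (PySem.List.pyGetD conjuntoTransicoes i []) 0 ""
               = PySem.List.pyGetD (PySem.List.pyGetD conjuntoTransicoes j []) 0 ""
             ∧ PySem.List.pyGetD (PySem.List.pyGetD conjuntoTransicoes i []) 1 ""
               = PySem.List.pyGetD (PySem.List.pyGetD conjuntoTransicoes j []) 1 ""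
          then c + 1 else c) c) 0
    if contador > 0 then "AFN" else "AFD"

-- ===== PORT B =====
def pvKey (t : List String) : String × String :=
  (PySem.List.pyGetD t 0 "", PySem.List.pyGetD t 1 "")

def pvScan : List (List String) → PySem.Set (String × String) → String
  | [], _ => "AFD"
  | t :: rest, seen =>
      let k := pvKey t
      if PySem.Set.contains seen k then "AFN" else pvScan rest (PySem.Set.add seen k)

def Verifica_AFD_AFN_alt (conjuntoTransicoes : List (List String)) (conjuntoEstadosIniciais : List String) : String :=
  if conjuntoEstadosIniciais.length > 1 then "AFN"
  else pvScan conjuntoTransicoes PySem.Set.empty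

-- ===== PRECONDITION & SPEC =====
-- Pre_ excludes transition rows shorter than 2 entries (unless the early multiple-initial-state
-- guard fires): there A raises IndexError on most such inputs and only returns by accident when
-- the short-circuited '==' never touches the missing second entry, while B always raises.
def Pre_Verifica_AFD_AFN (conjuntoTransicoes : List (List String)) (conjuntoEstadosIniciais : List String) : Prop :=
  conjuntoEstadosIniciais.length > 1 ∨ ∀ t ∈ conjuntoTransicoes, 2 ≤ t.length
instance (conjuntoTransicoes : List (List String)) (conjuntoEstadosIniciais : List String) : Decidable (Pre_Verifica_AFD_AFN conjuntoTransicoes conjuntoEstadosIniciais) := by unfold Pre_Verifica_AFD_AFN; infer_instance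

def pvWitness_Verifica_AFD_AFN : List (List String) × List String :=
  ([["q0", "a", "q1"], ["q0", "b", "q1"]], ["q0"])

def Spec_Verifica_AFD_AFN (conjuntoTransicoes : List (List String)) (conjuntoEstadosIniciais : List String) (out : String) : Prop := out = Verifica_AFD_AFN_alt conjuntoTransicoes conjuntoEstadosIniciais
instance (conjuntoTransicoes : List (List String)) (conjuntoEstadosIniciais : List String) (out : String) : Decidable (Spec_Verifica_AFD_AFN conjuntoTransicoes conjuntoEstadosIniciais out) := by unfold Spec_Verifica_AFD_AFN; infer_instance

-- ===== CLAIM (what is proved, stated in full; the proofs are below) =====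
def Claim_equal_Verifica_AFD_AFN : Prop := ∀ (conjuntoTransicoes : List (List String)) (conjuntoEstadosIniciais : List String), Dom_Verifica_AFD_AFN conjuntoTransicoes conjuntoEstadosIniciais → Pre_Verifica_AFD_AFN conjuntoTransicoes conjuntoEstadosIniciais → Spec_Verifica_AFD_AFN conjuntoTransicoes conjuntoEstadosIniciais (Verifica_AFD_AFN conjuntoTransicoes conjuntoEstadosIniciais)

-- ===== LEMMAS AND PROOFS =====

theorem pv_sum_pos_iff (l : List Int) (h : ∀ x ∈ l, 0 ≤ x) : 0 < l.sum ↔ ∃ x ∈ l, 0 < x := by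
  induction l with
  | nil => simp
  | cons x l ih =>
      have hx := h x (List.mem_cons_self ..)
      have hl := ih (fun y hy => h y (List.mem_cons_of_mem _ hy))
      have hs : 0 ≤ l.sum := List.sum_nonneg (fun y hy => h y (List.mem_cons_of_mem _ hy))
      simp only [List.sum_cons, List.mem_cons]
      constructor
      · intro hpos
        by_cases hx0 : 0 < x
        · exact ⟨x, Or.inl rfl, hx0⟩
        · have : 0 < l.sum := by omega
          obtain ⟨y, hy, hy0⟩ := hl.mp this
          exact ⟨y, Or.inr hy, hy0⟩
      · rintro ⟨y, (rfl | hy), hy0⟩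
        · omega
        · have := hl.mpr ⟨y, hy, hy0⟩; omega

theorem pv_not_nodup_iff {α : Type} (ks : List α) :
    ¬ ks.Nodup ↔ ∃ k, ∃ _ : k < ks.length, ks[k] ∈ ks.drop (k + 1) := by
  induction ks with
  | nil => simp
  | cons x ks ih =>
      simp only [List.nodup_cons, not_and_or, ih]
      constructor
      · rintro (hx | ⟨k, hk, hmem⟩)
        · exact ⟨0, by simp, by simpa using not_not.mp hx⟩
        · exact ⟨k + 1, by simpa using hk, by simpa using hmem⟩
      · rintro ⟨k, hk, hmem⟩
        cases k with
        | zero => exact Or.inl (by simpa using hmem)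
        | succ k => exact Or.inr ⟨k, by simpa using hk, by simpa using hmem⟩

theorem pv_contador_pos_iff (ts : List (List String)) :
    ((0:Int) < (PySem.List.pyRange 0 (ts.length : Int) 1).foldl (fun c i =>
        (PySem.List.pyRange (i + 1) (ts.length : Int) 1).foldl (fun c j =>
          if PySem.List.pyGetD (PySem.List.pyGetD ts i []) 0 ""
               = PySem.List.pyGetD (PySem.List.pyGetD ts j []) 0 ""
             ∧ PySem.List.pyGetD (PySem.List.pyGetD ts i []) 1 ""
               = PySem.List.pyGetD (PySem.List.pyGetD ts j []) 1 ""
          then c + 1 else c) c) (0:Int))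
    ↔ ¬ (ts.map pvKey).Nodup := by
  have hbody : ∀ (c : Int), ∀ i ∈ PySem.List.pyRange 0 (ts.length : Int) 1,
      (PySem.List.pyRange (i + 1) (ts.length : Int) 1).foldl (fun c j =>
          if PySem.List.pyGetD (PySem.List.pyGetD ts i []) 0 ""
               = PySem.List.pyGetD (PySem.List.pyGetD ts j []) 0 ""
             ∧ PySem.List.pyGetD (PySem.List.pyGetD ts i []) 1 ""
               = PySem.List.pyGetD (PySem.List.pyGetD ts j []) 1 ""
          then c + 1 else c) c
      = c + (((ts.drop (i + 1).toNat).countP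
          (fun t => decide (pvKey t = pvKey (PySem.List.pyGetD ts i [])))) : Int) := by
    intro c i hi
    have h0i : (0:Int) ≤ i := (PySem.List.mem_pyRange_one.mp hi).1
    rw [PySem.List.foldl_pyRange_pyGetD' ts []
        (fun c t => if PySem.List.pyGetD (PySem.List.pyGetD ts i []) 0 "" = PySem.List.pyGetD t 0 ""
             ∧ PySem.List.pyGetD (PySem.List.pyGetD ts i []) 1 "" = PySem.List.pyGetD t 1 ""
           then c + 1 else c) c
        (by omega : (0:Int) ≤ i + 1)]
    rw [PySem.List.foldl_ite_add_one
        (fun t => PySem.List.pyGetD (PySem.List.pyGetD ts i []) 0 "" = PySem.List.pyGetD t 0 ""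
             ∧ PySem.List.pyGetD (PySem.List.pyGetD ts i []) 1 "" = PySem.List.pyGetD t 1 "")]
    congr 1
    norm_cast
    apply List.countP_congr
    intro t _
    simp only [decide_eq_true_eq, pvKey, Prod.ext_iff]
    constructor <;> rintro ⟨h1, h2⟩ <;> exact ⟨h1.symm, h2.symm⟩
  have hfold := PySem.List.foldl_congr_mem (PySem.List.pyRange 0 (ts.length : Int) 1) _
      (fun c i => c + (((ts.drop (i + 1).toNat).countP
          (fun t => decide (pvKey t = pvKey (PySem.List.pyGetD ts i [])))) : Int)) 0 hbody
  rw [hfold, PySem.List.foldl_add, zero_add]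
  rw [pv_sum_pos_iff _ (by
      intro x hx
      simp only [List.mem_map] at hx
      obtain ⟨i, _, rfl⟩ := hx
      positivity)]
  rw [pv_not_nodup_iff]
  constructor
  · rintro ⟨x, hx, hxpos⟩
    simp only [List.mem_map] at hx
    obtain ⟨i, hi, rfl⟩ := hx
    obtain ⟨h0i, hin⟩ := PySem.List.mem_pyRange_one.mp hi
    have hk : i.toNat < ts.length := by omega
    refine ⟨i.toNat, by simpa using hk, ?_⟩
    have : 0 < (ts.drop (i + 1).toNat).countP
        (fun t => decide (pvKey t = pvKey (PySem.List.pyGetD ts i []))) := by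
      exact_mod_cast hxpos
    obtain ⟨t', ht'mem, ht'⟩ := List.countP_pos_iff.mp this
    have hidx : PySem.List.pyGetD ts i [] = ts[i.toNat] :=
      PySem.List.pyGetD_eq_getElem ts [] h0i hin
    have hdrop : (i + 1).toNat = i.toNat + 1 := by omega
    rw [List.getElem_map, ← List.map_drop]
    refine List.mem_map.mpr ⟨t', ?_, ?_⟩
    · rw [← hdrop]; exact ht'mem
    · rw [← hidx]; exact of_decide_eq_true ht'
  · rintro ⟨k, hk, hmem⟩
    have hk' : k < ts.length := by simpa using hk
    rw [List.getElem_map, ← List.map_drop] at hmem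
    obtain ⟨t', ht'mem, ht'⟩ := List.mem_map.mp hmem
    refine ⟨(((ts.drop ((k:Int) + 1).toNat).countP
        (fun t => decide (pvKey t = pvKey (PySem.List.pyGetD ts (k:Int) []))))
        : Int), List.mem_map.mpr ⟨(k : Int), PySem.List.mem_pyRange_one.mpr ⟨by omega, by exact_mod_cast hk'⟩, rfl⟩, ?_⟩
    have hidx : PySem.List.pyGetD ts (k:Int) [] = ts[k] :=
      PySem.List.pyGetD_eq_getElem ts [] (by omega) (by exact_mod_cast hk')
    have hdrop : ((k:Int) + 1).toNat = k + 1 := by omega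
    have : 0 < (ts.drop ((k:Int) + 1).toNat).countP
        (fun t => decide (pvKey t = pvKey (PySem.List.pyGetD ts (k:Int) []))) := by
      apply List.countP_pos_iff.mpr
      exact ⟨t', by rw [hdrop]; exact ht'mem, decide_eq_true (by rw [hidx]; exact ht')⟩
    exact_mod_cast this


-- B-side: the scan returns "AFD" iff the keys are pairwise distinct and avoid `seen`.
theorem pvScan_eq_AFD (ts : List (List String)) (seen : PySem.Set (String × String)) :
    pvScan ts seen = "AFD" ↔
      ((ts.map pvKey).Nodup ∧ ∀ k ∈ ts.map pvKey, k ∉ seen) := by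
  induction ts generalizing seen with
  | nil => simp [pvScan]
  | cons t rest ih =>
      by_cases h : pvKey t ∈ seen
      · simp [pvScan, PySem.Set.contains, h]
      · simp [pvScan, PySem.Set.contains, h, ih]
        constructor
        · rintro ⟨hnd, hs⟩
          exact ⟨⟨fun x hx => (hs x hx).2, hnd⟩, fun x hx => (hs x hx).1⟩
        · rintro ⟨⟨hne, hnd⟩, hs⟩
          exact ⟨hnd, fun x hx => ⟨hs x hx, hne x hx⟩⟩

theorem pvScan_AFD_or_AFN (ts : List (List String)) (seen : PySem.Set (String × String)) :
    pvScan ts seen = "AFD" ∨ pvScan ts seen = "AFN" := by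
  induction ts generalizing seen with
  | nil => exact Or.inl rfl
  | cons t rest ih =>
      by_cases h : pvKey t ∈ seen
      · exact Or.inr (by simp [pvScan, PySem.Set.contains, h])
      · simpa [pvScan, PySem.Set.contains, h] using ih (PySem.Set.add seen (pvKey t))

-- ===== VERDICT (by name: the statement is the Claim_ definition above) =====
theorem Verifica_AFD_AFN_spec : Claim_equal_Verifica_AFD_AFN := by
  intro ts inis _ _
  show Verifica_AFD_AFN ts inis = Verifica_AFD_AFN_alt ts inis
  unfold Verifica_AFD_AFN Verifica_AFD_AFN_alt
  by_cases h : inis.length > 1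
  · simp [h]
  · simp only [h, if_false]
    by_cases hnd : (ts.map pvKey).Nodup
    · have hc : ¬ ((0:Int) < (PySem.List.pyRange 0 (ts.length : Int) 1).foldl (fun c i =>
        (PySem.List.pyRange (i + 1) (ts.length : Int) 1).foldl (fun c j =>
          if PySem.List.pyGetD (PySem.List.pyGetD ts i []) 0 ""
               = PySem.List.pyGetD (PySem.List.pyGetD ts j []) 0 ""
             ∧ PySem.List.pyGetD (PySem.List.pyGetD ts i []) 1 ""
               = PySem.List.pyGetD (PySem.List.pyGetD ts j []) 1 ""
          then c + 1 else c) c) (0:Int)) := by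
        rw [pv_contador_pos_iff]; simpa using hnd
      have hscan : pvScan ts PySem.Set.empty = "AFD" :=
        (pvScan_eq_AFD ts PySem.Set.empty).mpr ⟨hnd, by simp [PySem.Set.empty]⟩
      simp only [hscan]
      simp only [gt_iff_lt] at hc ⊢
      rw [if_neg hc]
    · have hc : (0:Int) < (PySem.List.pyRange 0 (ts.length : Int) 1).foldl (fun c i =>
        (PySem.List.pyRange (i + 1) (ts.length : Int) 1).foldl (fun c j =>
          if PySem.List.pyGetD (PySem.List.pyGetD ts i []) 0 ""
               = PySem.List.pyGetD (PySem.List.pyGetD ts j []) 0 ""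
             ∧ PySem.List.pyGetD (PySem.List.pyGetD ts i []) 1 ""
               = PySem.List.pyGetD (PySem.List.pyGetD ts j []) 1 ""
          then c + 1 else c) c) (0:Int) := (pv_contador_pos_iff ts).mpr hnd
      have hscan : pvScan ts PySem.Set.empty = "AFN" := by
        rcases pvScan_AFD_or_AFN ts PySem.Set.empty with hs | hs
        · exact absurd ((pvScan_eq_AFD ts PySem.Set.empty).mp hs).1 hnd
        · exact hs
      simp only [hscan, gt_iff_lt]
      rw [if_pos hc]
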